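-- pv_equiv track=rewrite | github.com/HmbleCreator/ddin-reservoir | Experiments/ddin_exp54_vaikhari_generation.py | compute_pingala_address
-- ===== SOURCE A (Python) =====
-- LONG_VOWELS = set('AEIOUfF')
--
-- SHORT_VOWELS = set('aiux')
--
-- CONSONANTS = set('kKgGNcCjJYwWqQRtTdDnpPbBmyrlvSzsSh')
--
-- def compute_pingala_address(root_slp1, max_syllables=4):
--     chars = list(root_slp1)
--     syllables = []
--     i = 0
--     while i < len(chars):
--         c = chars[i]
--         if c in LONG_VOWELS or c in SHORT_VOWELS:
--             is_guru = c in LONG_VOWELS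
--             j, cluster = i + 1, 0
--             while j < len(chars) and chars[j] in CONSONANTS: cluster += 1; j += 1
--             if cluster > 1: is_guru = True
--             syllables.append(1 if is_guru else 0)
--             i = j
--         else: i += 1
--     addr = syllables[:max_syllables]
--     while len(addr) < max_syllables: addr.append(0)
--     return addr
-- ===== SOURCE B (Python) =====
-- LONG_VOWELS = set('AEIOUfF')
--
-- SHORT_VOWELS = set('aiux')
--
-- CONSONANTS = set('kKgGNcCjJYwWqQRtTdDnpPbBmyrlvSzsSh')
--
-- def compute_pingala_address(root_slp1, max_syllables=4):
--     # Single reverse pass: keep the length of the consonant run to the right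
--     # of the current character; classify each vowel on sight (no inner j-loop).
--     syllables = []
--     run = 0
--     for c in reversed(root_slp1):
--         if c in CONSONANTS:
--             run += 1
--         elif c in LONG_VOWELS or c in SHORT_VOWELS:
--             syllables.append(1 if (c in LONG_VOWELS or run > 1) else 0)
--             run = 0
--         else:
--             run = 0
--     syllables.reverse()
--     addr = syllables[:max_syllables]
--     return addr + [0] * max(0, max_syllables - len(addr))
-- ===== Notes on version B (the rewrite author's own statement) =====
-- stated objective: alternative
-- what changed: Replaces the nested index/j-advance scan (inner while loop counting each vowel's following consonant cluster) with a single reverse pass that maintains the running consonant-cluster length, classifying each vowel on sight.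
import Mathlib
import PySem

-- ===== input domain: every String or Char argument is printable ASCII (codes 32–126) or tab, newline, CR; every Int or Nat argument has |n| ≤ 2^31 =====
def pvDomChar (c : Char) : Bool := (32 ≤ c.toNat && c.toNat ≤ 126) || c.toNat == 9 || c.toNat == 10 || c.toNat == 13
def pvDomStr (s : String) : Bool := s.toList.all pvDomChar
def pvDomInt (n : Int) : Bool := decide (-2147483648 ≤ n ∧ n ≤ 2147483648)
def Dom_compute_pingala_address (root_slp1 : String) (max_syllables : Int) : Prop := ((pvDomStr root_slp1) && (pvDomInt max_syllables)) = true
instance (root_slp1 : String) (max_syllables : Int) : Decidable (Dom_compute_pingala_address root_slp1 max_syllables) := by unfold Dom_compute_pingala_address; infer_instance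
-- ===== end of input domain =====

-- B changes the decomposition: one reverse pass carrying the consonant-run length, instead of A's nested index loop; return values proved equal.

-- ===== PORT A =====
def pvIsLong (c : Char) : Bool := "AEIOUfF".toList.contains c
def pvIsShort (c : Char) : Bool := "aiux".toList.contains c
def pvIsCons (c : Char) : Bool := "kKgGNcCjJYwWqQRtTdDnpPbBmyrlvSzsSh".toList.contains c

-- inner while loop of A: returns the final j
def pvAConsRun (chars : List Char) (j : Nat) : Nat :=
  if h : j < chars.length then
    if pvIsCons chars[j] then pvAConsRun chars (j + 1) else j
  else j
termination_by chars.length - j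

theorem pvAConsRun_ge (chars : List Char) (j : Nat) : j ≤ pvAConsRun chars j := by
  fun_induction pvAConsRun chars j with
  | case1 j h hc ih => omega
  | case2 j h hc => omega
  | case3 j h => omega

-- outer while loop of A (syl is the accumulated syllables list)
def pvALoop (chars : List Char) (i : Nat) (syl : List Int) : List Int :=
  if h : i < chars.length then
    let c := chars[i]
    if pvIsLong c || pvIsShort c then
      let j := pvAConsRun chars (i + 1)
      let cluster := j - (i + 1)
      let is_guru := pvIsLong c || decide (cluster > 1)
      pvALoop chars j (syl ++ [if is_guru then (1 : Int) else 0])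
    else
      pvALoop chars (i + 1) syl
  else syl
termination_by chars.length - i
decreasing_by
  · have := pvAConsRun_ge chars (i + 1); omega
  · omega

-- trailing pad-with-zeros while loop of A
def pvAPad (addr : List Int) (m : Int) : List Int :=
  if (addr.length : Int) < m then pvAPad (addr ++ [0]) m else addr
termination_by (m - addr.length).toNat
decreasing_by simp; omega

def compute_pingala_address (root_slp1 : String) (max_syllables : Int) : List Int :=
  let syllables := pvALoop root_slp1.toList 0 []
  pvAPad (PySem.List.slice syllables none (some max_syllables)) max_syllables

-- ===== PORT B =====
-- the body of Source B's 'for c in reversed(root_slp1)' loop; state = (run, syllables)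
def pvBStep (st : Nat × List Int) (c : Char) : Nat × List Int :=
  if pvIsCons c then (st.1 + 1, st.2)
  else if pvIsLong c || pvIsShort c then
    (0, st.2 ++ [if pvIsLong c || decide (st.1 > 1) then (1 : Int) else 0])
  else (0, st.2)

def compute_pingala_address_alt (root_slp1 : String) (max_syllables : Int) : List Int :=
  let syllables := (root_slp1.toList.reverse.foldl pvBStep (0, [])).2.reverse
  let addr := PySem.List.slice syllables none (some max_syllables)
  addr ++ List.replicate (max 0 (max_syllables - addr.length)).toNat 0

-- ===== PRECONDITION & SPEC =====
def Spec_compute_pingala_address (root_slp1 : String) (max_syllables : Int) (out : List Int) : Prop := out = compute_pingala_address_alt root_slp1 max_syllables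
instance (root_slp1 : String) (max_syllables : Int) (out : List Int) : Decidable (Spec_compute_pingala_address root_slp1 max_syllables out) := by unfold Spec_compute_pingala_address; infer_instance

-- ===== CLAIM (what is proved, stated in full; the proofs are below) =====
def Claim_equal_compute_pingala_address : Prop := ∀ (root_slp1 : String) (max_syllables : Int), Dom_compute_pingala_address root_slp1 max_syllables → Spec_compute_pingala_address root_slp1 max_syllables (compute_pingala_address root_slp1 max_syllables)

-- ===== LEMMAS AND PROOFS =====

-- length of the consonant prefix
def pvRun (cs : List Char) : Nat := (cs.takeWhile pvIsCons).length

-- reference syllabification, recursion on the string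
def pvSyl : List Char → List Int
  | [] => []
  | c :: cs =>
    if pvIsLong c || pvIsShort c then
      (if pvIsLong c || decide (pvRun cs > 1) then (1 : Int) else 0) ::
        pvSyl (cs.drop (pvRun cs))
    else pvSyl cs
termination_by cs => cs.length
decreasing_by
  · simp only [List.length_drop, List.length_cons]; omega
  · simp only [List.length_cons]; omega

set_option maxRecDepth 2000 in
theorem pvCons_not_vowel_bool :
    ("kKgGNcCjJYwWqQRtTdDnpPbBmyrlvSzsSh".toList.all (fun c => !pvIsLong c && !pvIsShort c)) = true := by decide

theorem pvCons_not_vowel : ∀ c ∈ "kKgGNcCjJYwWqQRtTdDnpPbBmyrlvSzsSh".toList,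
    pvIsLong c = false ∧ pvIsShort c = false := by
  intro c hc
  have := List.all_eq_true.mp pvCons_not_vowel_bool c hc
  simp_all

theorem pvIsCons_not_vowel {c : Char} (h : pvIsCons c = true) :
    pvIsLong c = false ∧ pvIsShort c = false := by
  have hm : c ∈ "kKgGNcCjJYwWqQRtTdDnpPbBmyrlvSzsSh".toList := by
    simpa [pvIsCons] using h
  exact pvCons_not_vowel c hm

theorem pvRun_cons_true {c : Char} (cs : List Char) (h : pvIsCons c = true) :
    pvRun (c :: cs) = pvRun cs + 1 := by
  simp [pvRun, List.takeWhile, h]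

theorem pvRun_cons_false {c : Char} (cs : List Char) (h : pvIsCons c = false) :
    pvRun (c :: cs) = 0 := by
  simp [pvRun, List.takeWhile, h]

theorem pvSyl_cons_consonant {c : Char} (cs : List Char) (h : pvIsCons c = true) :
    pvSyl (c :: cs) = pvSyl cs := by
  obtain ⟨h1, h2⟩ := pvIsCons_not_vowel h
  simp [pvSyl, h1, h2]

theorem pvSyl_drop_run (cs : List Char) : pvSyl (cs.drop (pvRun cs)) = pvSyl cs := by
  induction cs with
  | nil => simp [pvRun]
  | cons c cs ih =>
    by_cases hc : pvIsCons c = true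
    · rw [pvRun_cons_true cs hc, pvSyl_cons_consonant cs hc, List.drop_succ_cons]
      exact ih
    · rw [pvRun_cons_false cs (by simpa using hc)]
      simp

-- A's inner loop computes i+1 plus the consonant-run length
theorem pvAConsRun_eq (chars : List Char) (j : Nat) :
    pvAConsRun chars j = j + pvRun (chars.drop j) := by
  fun_induction pvAConsRun chars j with
  | case1 j h hc ih =>
    rw [ih]
    rw [List.drop_eq_getElem_cons h, pvRun_cons_true _ hc]
    omega
  | case2 j h hc =>
    rw [List.drop_eq_getElem_cons h, pvRun_cons_false _ (by simpa using hc)]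
    omega
  | case3 j h =>
    rw [List.drop_eq_nil_of_le (by omega)]
    simp [pvRun]

-- A's outer loop computes the reference syllabification
theorem pvALoop_eq (chars : List Char) (i : Nat) (syl : List Int) :
    pvALoop chars i syl = syl ++ pvSyl (chars.drop i) := by
  fun_induction pvALoop chars i syl with
  | case1 i syl h c hv j cluster is_guru ih =>
    simp only [dite_eq_ite] at ih
    rw [ih]
    have hj : j = (i + 1) + pvRun (chars.drop (i + 1)) := pvAConsRun_eq chars (i + 1)
    have hdij : chars.drop j = (chars.drop (i + 1)).drop (pvRun (chars.drop (i + 1))) := by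
      rw [List.drop_drop, ← hj]
    rw [hdij, pvSyl_drop_run, ← pvSyl_drop_run (chars.drop (i + 1))]
    rw [List.drop_eq_getElem_cons h]
    have hcl : cluster = pvRun (chars.drop (i + 1)) := by omega
    simp only [pvSyl, List.append_assoc, List.singleton_append]
    rw [if_pos hv]
    have hg : is_guru = (pvIsLong chars[i] || decide (pvRun (List.drop (i + 1) chars) > 1)) := by
      rw [← hcl]
    rw [hg]
  | case2 i syl h c hv ih =>
    rw [ih, List.drop_eq_getElem_cons h]
    simp only [pvSyl]
    simp only [c] at hv
    rw [if_neg (by simpa using hv)]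
  | case3 i syl h =>
    rw [List.drop_eq_nil_of_le (by omega)]
    simp [pvSyl]

-- B's fold (in foldr form) computes the run length and the reversed syllabification
theorem pvBFoldr_eq (cs : List Char) :
    cs.foldr (fun c st => pvBStep st c) ((0 : Nat), ([] : List Int)) =
      (pvRun cs, (pvSyl cs).reverse) := by
  induction cs with
  | nil => simp [pvRun, pvSyl]
  | cons c cs ih =>
    simp only [List.foldr_cons, ih]
    by_cases hc : pvIsCons c = true
    · obtain ⟨h1, h2⟩ := pvIsCons_not_vowel hc
      simp [pvBStep, hc, pvRun_cons_true cs hc, pvSyl_cons_consonant cs hc]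
    · have hc' : pvIsCons c = false := by simpa using hc
      by_cases hv : (pvIsLong c || pvIsShort c) = true
      · simp only [pvBStep, hc', Bool.false_eq_true, if_false, hv, if_true]
        rw [pvRun_cons_false cs hc']
        simp only [pvSyl, hv, if_true]
        rw [← pvSyl_drop_run cs]
        simp
      · have hv' : (pvIsLong c || pvIsShort c) = false := by simpa using hv
        simp [pvBStep, hc', hv', pvRun_cons_false cs hc', pvSyl]

theorem pvB_syllables_eq (cs : List Char) :
    ((cs.reverse.foldl pvBStep (0, [])).2).reverse = pvSyl cs := by
  rw [List.foldl_reverse, pvBFoldr_eq]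
  simp

-- A's pad loop is appending the right number of zeros
theorem pvAPad_eq (addr : List Int) (m : Int) :
    pvAPad addr m = addr ++ List.replicate (max 0 (m - addr.length)).toNat 0 := by
  fun_induction pvAPad addr m with
  | case1 addr h ih =>
    rw [ih]
    have hk : (max 0 (m - ((addr ++ [(0:Int)]).length : Int))).toNat + 1
        = (max 0 (m - (addr.length : Int))).toNat := by
      simp only [List.length_append, List.length_cons, List.length_nil]
      omega
    rw [← hk, List.replicate_succ, List.append_assoc]
    simp
  | case2 addr h =>
    have : (max 0 (m - (addr.length : Int))).toNat = 0 := by omega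
    simp [this]

-- ===== VERDICT (by name: the statement is the Claim_ definition above) =====
theorem compute_pingala_address_spec : Claim_equal_compute_pingala_address := by
  intro root_slp1 max_syllables _
  unfold Spec_compute_pingala_address compute_pingala_address compute_pingala_address_alt
  rw [pvB_syllables_eq]
  have h : pvALoop root_slp1.toList 0 [] = pvSyl root_slp1.toList := by
    simpa using pvALoop_eq root_slp1.toList 0 []
  rw [h, pvAPad_eq]
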